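-- pv_equiv track=rewrite | github.com/tarkatan/lab7 | cod.py | inv_affine_transform
-- ===== SOURCE A (Python) =====
-- def inv_affine_transform(byte):
--     """Виконує зворотне аффінне перетворення для одного байта"""
--     c = 0x05
--     result = 0
--     for i in range(8):
--         bit = (
--             ((byte >> ((i + 2) % 8)) & 1) ^
--             ((byte >> ((i + 5) % 8)) & 1) ^
--             ((byte >> ((i + 7) % 8)) & 1) ^
--             ((c >> i) & 1)
--         )
--         result |= (bit << i)
--     return result
-- ===== SOURCE B (Python) =====
-- def inv_affine_transform(byte):
--     """Inverse affine transform of one byte as whole-byte rotations (no per-bit loop)."""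
--     x = byte & 0xFF
--     def rotr(v, n):
--         return ((v >> n) | (v << (8 - n))) & 0xFF
--     return rotr(x, 2) ^ rotr(x, 5) ^ rotr(x, 7) ^ 0x05
-- ===== Notes on version B (the rewrite author's own statement) =====
-- stated objective: simpler
-- what changed: Replaced the per-bit loop with a running OR-accumulator by a single whole-byte expression: mask the input to its low byte and XOR three byte right-rotations of it with the affine constant.
import Mathlib
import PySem

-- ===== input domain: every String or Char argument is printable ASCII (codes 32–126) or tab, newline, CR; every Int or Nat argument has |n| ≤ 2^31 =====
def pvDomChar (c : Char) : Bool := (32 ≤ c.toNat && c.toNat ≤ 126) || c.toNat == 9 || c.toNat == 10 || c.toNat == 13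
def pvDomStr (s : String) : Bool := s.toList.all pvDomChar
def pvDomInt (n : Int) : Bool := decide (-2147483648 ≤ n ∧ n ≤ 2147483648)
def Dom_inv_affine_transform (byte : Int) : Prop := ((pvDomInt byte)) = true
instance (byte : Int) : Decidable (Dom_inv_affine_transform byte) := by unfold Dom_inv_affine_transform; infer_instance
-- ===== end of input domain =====

-- B computes the inverse affine transform as three whole-byte right-rotations XORed
-- with 0x05 (one expression), instead of A's per-bit loop over the 8 bit positions (objective: simpler).


-- ===== PORT A =====
-- literal transliteration: c = 0x05; for i in range(8): bit = xor of three byte bits and c's bit i; result |= bit << i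
def inv_affine_transform (byte : Int) : Int :=
  let c : Int := 0x05
  (PySem.List.pyRange 0 8 1).foldl (fun result i =>
    let bit :=
      PySem.Int.bxor (PySem.Int.bxor (PySem.Int.bxor
        (PySem.Int.band (byte >>> (PySem.Int.mod (i + 2) 8).toNat) 1)
        (PySem.Int.band (byte >>> (PySem.Int.mod (i + 5) 8).toNat) 1))
        (PySem.Int.band (byte >>> (PySem.Int.mod (i + 7) 8).toNat) 1))
        (PySem.Int.band (c >>> i.toNat) 1)
    PySem.Int.bor result (bit <<< i.toNat)) 0

-- ===== PORT B =====
-- rotr(v, n) = ((v >> n) | (v << (8 - n))) & 0xFF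
def pvRotr (v n : Int) : Int :=
  PySem.Int.band (PySem.Int.bor (v >>> n.toNat) (v <<< (8 - n).toNat)) 0xFF

def inv_affine_transform_alt (byte : Int) : Int :=
  let x := PySem.Int.band byte 0xFF
  PySem.Int.bxor (PySem.Int.bxor (PySem.Int.bxor (pvRotr x 2) (pvRotr x 5)) (pvRotr x 7)) 0x05

-- ===== PRECONDITION & SPEC =====
def Spec_inv_affine_transform (byte : Int) (out : Int) : Prop := out = inv_affine_transform_alt byte
instance (byte : Int) (out : Int) : Decidable (Spec_inv_affine_transform byte out) := by unfold Spec_inv_affine_transform; infer_instance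

-- ===== CLAIM (what is proved, stated in full; the proofs are below) =====
def Claim_equal_inv_affine_transform : Prop := ∀ (byte : Int), Dom_inv_affine_transform byte → Spec_inv_affine_transform byte (inv_affine_transform byte)

-- ===== LEMMAS AND PROOFS =====

-- PySem.Int.mod with a nonnegative modulus is Lean's emod
theorem pv_mod_eq_emod (x m : Int) (hm : 0 ≤ m) : PySem.Int.mod x m = x % m := by
  unfold PySem.Int.mod
  simp [Int.fmod_eq_emod, hm]

-- Python's x & 0xFF is x mod 256 (both for nonnegative and negative x).
theorem pv_band255_eq_mod (x : Int) : PySem.Int.band x 255 = PySem.Int.mod x 256 := by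
  rw [pv_mod_eq_emod x 256 (by norm_num)]
  unfold PySem.Int.band
  by_cases hx : 0 ≤ x
  · simp only [hx, if_true, show (0:Int) ≤ 255 from by norm_num, if_true]
    have h1 : (255:Int).toNat = 255 := rfl
    rw [h1, show (255:Nat) = 2 ^ 8 - 1 from rfl, Nat.and_two_pow_sub_one_eq_mod]
    omega
  · simp only [hx, if_false, show (0:Int) ≤ 255 from by norm_num, if_true]
    have h1 : (255:Int).toNat = 255 := rfl
    rw [h1, Nat.and_comm, show (255:Nat) = 2 ^ 8 - 1 from rfl, Nat.and_two_pow_sub_one_eq_mod]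
    omega

-- bit k (k < 8) of x only depends on x mod 256
theorem pv_bit_mod256 (x : Int) (k : Nat) (hk : k < 8) :
    PySem.Int.band (x >>> k) 1 = PySem.Int.band (PySem.Int.mod x 256 >>> k) 1 := by
  rw [PySem.Int.band_one, PySem.Int.band_one,
      pv_mod_eq_emod x 256 (by norm_num),
      pv_mod_eq_emod _ 2 (by norm_num), pv_mod_eq_emod _ 2 (by norm_num),
      Int.shiftRight_eq_div_pow, Int.shiftRight_eq_div_pow]
  interval_cases k <;> norm_num <;> omega

-- the loop in A reads only bits 0–7, so A only depends on byte mod 256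
theorem pv_A_mod (x : Int) :
    inv_affine_transform x = inv_affine_transform (PySem.Int.mod x 256) := by
  have hr : PySem.List.pyRange 0 8 1 = ([0, 1, 2, 3, 4, 5, 6, 7] : List Int) := by decide
  simp only [inv_affine_transform, hr, List.foldl,
    show (PySem.Int.mod ((0:Int) + 2) 8).toNat = 2 from by decide,
    show (PySem.Int.mod ((0:Int) + 5) 8).toNat = 5 from by decide,
    show (PySem.Int.mod ((0:Int) + 7) 8).toNat = 7 from by decide,
    show (PySem.Int.mod ((1:Int) + 2) 8).toNat = 3 from by decide,
    show (PySem.Int.mod ((1:Int) + 5) 8).toNat = 6 from by decide,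
    show (PySem.Int.mod ((1:Int) + 7) 8).toNat = 0 from by decide,
    show (PySem.Int.mod ((2:Int) + 2) 8).toNat = 4 from by decide,
    show (PySem.Int.mod ((2:Int) + 5) 8).toNat = 7 from by decide,
    show (PySem.Int.mod ((2:Int) + 7) 8).toNat = 1 from by decide,
    show (PySem.Int.mod ((3:Int) + 2) 8).toNat = 5 from by decide,
    show (PySem.Int.mod ((3:Int) + 5) 8).toNat = 0 from by decide,
    show (PySem.Int.mod ((3:Int) + 7) 8).toNat = 2 from by decide,
    show (PySem.Int.mod ((4:Int) + 2) 8).toNat = 6 from by decide,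
    show (PySem.Int.mod ((4:Int) + 5) 8).toNat = 1 from by decide,
    show (PySem.Int.mod ((4:Int) + 7) 8).toNat = 3 from by decide,
    show (PySem.Int.mod ((5:Int) + 2) 8).toNat = 7 from by decide,
    show (PySem.Int.mod ((5:Int) + 5) 8).toNat = 2 from by decide,
    show (PySem.Int.mod ((5:Int) + 7) 8).toNat = 4 from by decide,
    show (PySem.Int.mod ((6:Int) + 2) 8).toNat = 0 from by decide,
    show (PySem.Int.mod ((6:Int) + 5) 8).toNat = 3 from by decide,
    show (PySem.Int.mod ((6:Int) + 7) 8).toNat = 5 from by decide,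
    show (PySem.Int.mod ((7:Int) + 2) 8).toNat = 1 from by decide,
    show (PySem.Int.mod ((7:Int) + 5) 8).toNat = 4 from by decide,
    show (PySem.Int.mod ((7:Int) + 7) 8).toNat = 6 from by decide,
    show ((0:Int)).toNat = 0 from rfl,
    show ((1:Int)).toNat = 1 from rfl,
    show ((2:Int)).toNat = 2 from rfl,
    show ((3:Int)).toNat = 3 from rfl,
    show ((4:Int)).toNat = 4 from rfl,
    show ((5:Int)).toNat = 5 from rfl,
    show ((6:Int)).toNat = 6 from rfl,
    show ((7:Int)).toNat = 7 from rfl]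
  rw [pv_bit_mod256 x 0 (by norm_num), pv_bit_mod256 x 1 (by norm_num),
      pv_bit_mod256 x 2 (by norm_num), pv_bit_mod256 x 3 (by norm_num),
      pv_bit_mod256 x 4 (by norm_num), pv_bit_mod256 x 5 (by norm_num),
      pv_bit_mod256 x 6 (by norm_num), pv_bit_mod256 x 7 (by norm_num)]

-- B masks with & 0xFF, so B only depends on byte mod 256
theorem pv_B_mod (x : Int) :
    inv_affine_transform_alt x = inv_affine_transform_alt (PySem.Int.mod x 256) := by
  simp only [inv_affine_transform_alt, pv_band255_eq_mod]
  have : PySem.Int.mod (PySem.Int.mod x 256) 256 = PySem.Int.mod x 256 := by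
    rw [pv_mod_eq_emod _ 256 (by norm_num), pv_mod_eq_emod _ 256 (by norm_num)]
    omega
  rw [this]

-- the two ports agree on every residue 0 ≤ r < 256
set_option maxRecDepth 10000 in
theorem pv_agree_small : ∀ (n : Fin 256),
    inv_affine_transform (n : Int) = inv_affine_transform_alt (n : Int) := by decide

-- ===== VERDICT (by name: the statement is the Claim_ definition above) =====
theorem inv_affine_transform_spec : Claim_equal_inv_affine_transform := by
  intro byte _
  unfold Spec_inv_affine_transform
  rw [pv_A_mod, pv_B_mod]
  have he : PySem.Int.mod byte 256 = byte % 256 := pv_mod_eq_emod byte 256 (by norm_num)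
  have h0 : (0 : Int) ≤ PySem.Int.mod byte 256 := by omega
  have h1 : PySem.Int.mod byte 256 < 256 := by omega
  have hc : PySem.Int.mod byte 256 = ((⟨(PySem.Int.mod byte 256).toNat, by omega⟩ : Fin 256) : Int) := by
    simp; omega
  rw [hc, pv_agree_small]
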